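-- pv_equiv track=rewrite | github.com/YangXiaoo/Lookoop | LeetCode/otherQuestion/JD/Q2.py | getMaxOutdegree
-- ===== SOURCE A (Python) =====
-- def getMaxOutdegree(friends):
--     """获得朋友数最多的学生编号
--     @returns -1 未找到
--     """
--     # 根据字典排序
--     keys = sorted(friends.keys())
--     maxCount = 0
--     retS = -1
--     for s in keys:
--         if len(friends[s]) > maxCount:
--             maxCount = len(friends[s])
--             retS = s
--
--     return retS
-- ===== SOURCE B (Python) =====
-- def getMaxOutdegree(friends):
--     """获得朋友数最多的学生编号
--     @returns -1 未找到
--     """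
--     if not friends:
--         return -1
--     maxVal = max(len(v) for v in friends.values())
--     if maxVal == 0:
--         return -1
--     return min(s for s in friends if len(friends[s]) == maxVal)
-- ===== Notes on version B (the rewrite author's own statement) =====
-- stated objective: simpler
-- what changed: A sorts the keys and scans them with a strict-improvement running (maxCount, retS) pair; B never sorts: it handles the empty dict up front, takes the max of the friend-list lengths in one pass, returns -1 if it is 0, and otherwise returns the min of the keys attaining that max.
import Mathlib
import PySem

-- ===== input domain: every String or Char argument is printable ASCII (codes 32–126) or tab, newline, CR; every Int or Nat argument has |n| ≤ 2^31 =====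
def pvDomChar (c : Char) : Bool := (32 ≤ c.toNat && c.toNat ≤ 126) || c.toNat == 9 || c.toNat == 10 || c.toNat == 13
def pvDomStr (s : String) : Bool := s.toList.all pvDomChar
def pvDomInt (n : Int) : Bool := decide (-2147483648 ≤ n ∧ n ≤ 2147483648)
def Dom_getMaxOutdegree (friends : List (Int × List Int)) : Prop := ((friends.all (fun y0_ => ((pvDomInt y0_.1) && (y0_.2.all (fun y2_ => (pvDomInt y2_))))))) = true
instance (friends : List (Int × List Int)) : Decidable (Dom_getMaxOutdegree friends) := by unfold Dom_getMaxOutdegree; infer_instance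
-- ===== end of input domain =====

-- B replaces A's sort-then-running-best scan by an empty check, a max over the degree counts, and a min over the keys attaining it (objective: simpler, no sort).

-- ===== PORT A =====
-- keys = sorted(friends.keys()); running (maxCount, retS), updated on strict improvement
def getMaxOutdegree (friends : List (Int × List Int)) : Int :=
  let keys := PySem.List.sorted (friends.map Prod.fst) (fun x => x) false
  let st := keys.foldl (fun (p : Nat × Int) s =>
      if ((PySem.Dict.mk friends).getD s []).length > p.1
      then (((PySem.Dict.mk friends).getD s []).length, s)
      else p) (0, -1)
  st.2

-- ===== PORT B =====
-- if not friends: -1; maxVal = max of the value lengths; if 0: -1; else min key whose list has length maxVal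
def getMaxOutdegree_alt (friends : List (Int × List Int)) : Int :=
  if friends.isEmpty then -1
  else
    let maxVal := (PySem.List.max? (friends.map (fun p => p.2.length)) (fun x => x)).getD 0
    if maxVal = 0 then -1
    else
      (PySem.List.min?
        ((friends.map Prod.fst).filter
          (fun s => ((PySem.Dict.mk friends).getD s []).length == maxVal))
        (fun x => x)).getD (-1)

-- ===== PRECONDITION & SPEC =====
-- Pre_ excludes association lists with duplicate keys: a Python dict cannot contain them,
-- so they correspond to no input of the Python programs (no input A returns on is excluded).
def Pre_getMaxOutdegree (friends : List (Int × List Int)) : Prop :=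
  (friends.map Prod.fst).Nodup
instance (friends : List (Int × List Int)) : Decidable (Pre_getMaxOutdegree friends) := by
  unfold Pre_getMaxOutdegree; infer_instance

def pvWitness_getMaxOutdegree : (List (Int × List Int)) := [(3, [1, 2]), (1, [2])]

def Spec_getMaxOutdegree (friends : List (Int × List Int)) (out : Int) : Prop := out = getMaxOutdegree_alt friends
instance (friends : List (Int × List Int)) (out : Int) : Decidable (Spec_getMaxOutdegree friends out) := by unfold Spec_getMaxOutdegree; infer_instance

-- ===== CLAIM (what is proved, stated in full; the proofs are below) =====
def Claim_equal_getMaxOutdegree : Prop := ∀ (friends : List (Int × List Int)), Dom_getMaxOutdegree friends → Pre_getMaxOutdegree friends → Spec_getMaxOutdegree friends (getMaxOutdegree friends)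

-- ===== LEMMAS AND PROOFS =====

theorem pvFind?_eq_head?_filter (p : Int → Bool) (l : List Int) : l.find? p = (l.filter p).head? := by
  induction l with
  | nil => rfl
  | cons a t ih =>
    cases hpa : p a
    · rw [List.find?_cons_of_neg (by simp [hpa]), List.filter_cons_of_neg (by simp [hpa]), ih]
    · rw [List.find?_cons_of_pos hpa, List.filter_cons_of_pos hpa]; rfl

theorem pvFoldlMax_le_start (f : Int → Nat) (ks : List Int) (m : Nat) :
    m ≤ ks.foldl (fun a s => max a (f s)) m := by
  induction ks generalizing m with
  | nil => simp
  | cons s t ih => exact le_trans (Nat.le_max_left _ _) (ih _)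

theorem pvFoldlMax_mem_le (f : Int → Nat) (ks : List Int) (m : Nat) :
    ∀ t ∈ ks, f t ≤ ks.foldl (fun a s => max a (f s)) m := by
  induction ks generalizing m with
  | nil => intro t ht; cases ht
  | cons s r ih =>
    intro t ht
    rcases List.mem_cons.mp ht with h | h
    · subst h; exact le_trans (Nat.le_max_right _ _) (pvFoldlMax_le_start _ _ _)
    · exact ih _ t h

theorem pvFoldlMax_of_all_le (f : Int → Nat) (ks : List Int) (m : Nat)
    (h : ∀ t ∈ ks, f t ≤ m) : ks.foldl (fun a s => max a (f s)) m = m := by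
  induction ks generalizing m with
  | nil => rfl
  | cons s r ih =>
    have hs : f s ≤ m := h s (List.mem_cons_self ..)
    simp only [List.foldl_cons, Nat.max_eq_left hs]
    exact ih _ (fun t ht => h t (List.mem_cons_of_mem _ ht))

theorem pvFoldlMax_attained (f : Int → Nat) (ks : List Int) (m : Nat)
    (h : ¬ ∀ t ∈ ks, f t ≤ m) :
    ∃ t ∈ ks, f t = ks.foldl (fun a s => max a (f s)) m := by
  induction ks generalizing m with
  | nil => exact absurd (by simp) h
  | cons s r ih =>
    simp only [List.foldl_cons]
    by_cases hr : ∀ t ∈ r, f t ≤ max m (f s)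
    · refine ⟨s, List.mem_cons_self .., ?_⟩
      rw [pvFoldlMax_of_all_le _ _ _ hr]
      have hns : ¬ f s ≤ m := by
        intro hle
        refine h ?_
        intro t ht
        rcases List.mem_cons.mp ht with h' | h'
        · exact h' ▸ hle
        · exact le_trans (hr t h') (by omega)
      omega
    · obtain ⟨t, ht, he⟩ := ih _ hr
      exact ⟨t, List.mem_cons_of_mem _ ht, he⟩

theorem pvLoopA_char (f : Int → Nat) (ks : List Int) (m : Nat) (r : Int) :
    ks.foldl (fun (p : Nat × Int) s => if f s > p.1 then (f s, s) else p) (m, r)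
    = if ∀ t ∈ ks, f t ≤ m then (m, r)
      else (ks.foldl (fun a s => max a (f s)) m,
            ((ks.find? (fun s => f s == ks.foldl (fun a s => max a (f s)) m)).getD r)) := by
  induction ks generalizing m r with
  | nil => simp
  | cons s t ih =>
    rw [List.foldl_cons]
    have hstep : (if f s > (m, r).1 then (f s, s) else (m, r))
        = if f s > m then (f s, s) else (m, r) := rfl
    rw [hstep]
    simp only [List.foldl_cons]
    by_cases hs : f s > m
    · rw [if_neg (show ¬ ∀ u ∈ s :: t, f u ≤ m by push_neg; exact ⟨s, by simp, hs⟩)]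
      rw [if_pos hs, ih]
      have hmax : max m (f s) = f s := by omega
      rw [hmax]
      by_cases ht : ∀ u ∈ t, f u ≤ f s
      · rw [if_pos ht, pvFoldlMax_of_all_le _ _ _ ht]
        simp [List.find?]
      · rw [if_neg ht]
        have hM : f s < t.foldl (fun a s => max a (f s)) (f s) := by
          push_neg at ht; obtain ⟨u, hu, hlt⟩ := ht
          exact lt_of_lt_of_le hlt (pvFoldlMax_mem_le _ _ _ u hu)
        obtain ⟨u, hu, he⟩ := pvFoldlMax_attained f t (f s) ht
        have hfind : t.find? (fun s' => f s' == t.foldl (fun a s => max a (f s)) (f s)) ≠ none := by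
          intro hn
          have := List.find?_eq_none.mp hn u hu
          simp [he] at this
        have hss : (f s == t.foldl (fun a s => max a (f s)) (f s)) = false := by
          simp; omega
        simp only [List.find?, hss]
        obtain ⟨v, hv⟩ := Option.ne_none_iff_exists'.mp hfind
        simp [hv]
    · rw [if_neg hs, ih]
      have hmax : max m (f s) = m := by omega
      rw [hmax]
      by_cases ht : ∀ u ∈ t, f u ≤ m
      · rw [if_pos ht, if_pos ?_]
        intro u hu
        rcases List.mem_cons.mp hu with h' | h'
        · subst h'; omega
        · exact ht u h'
      · rw [if_neg ht, if_neg ?_]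
        swap
        · push_neg at ht ⊢
          obtain ⟨u, hu, hlt⟩ := ht
          exact ⟨u, List.mem_cons_of_mem _ hu, hlt⟩
        have hM : m < t.foldl (fun a s => max a (f s)) m := by
          push_neg at ht; obtain ⟨u, hu, hlt⟩ := ht
          exact lt_of_lt_of_le hlt (pvFoldlMax_mem_le _ _ _ u hu)
        have hss : (f s == t.foldl (fun a s => max a (f s)) m) = false := by
          simp; omega
        simp only [List.find?, hss]

theorem pvMin?_eq_head (xs ys : List Int) (hperm : ys.Perm xs)
    (hsort : ys.Pairwise (· < ·)) (hd : Int) (tl : List Int) (hys : ys = hd :: tl) :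
    PySem.List.min? xs (fun x => x) = some hd := by
  have hne : xs ≠ [] := by
    intro h; subst h
    exact (by simp [hys] : ys ≠ []) (List.Perm.eq_nil hperm)
  obtain ⟨m, hm⟩ : ∃ m, PySem.List.min? xs (fun x => x) = some m := by
    cases h : PySem.List.min? xs (fun x => x) with
    | none => exact absurd ((PySem.List.min?_eq_none_iff xs _).mp h) hne
    | some m => exact ⟨m, rfl⟩
  have hmmem : m ∈ xs := PySem.List.min?_mem hm
  have hmin : ∀ y ∈ xs, m ≤ y := fun y hy => PySem.List.min?_isMin hm y hy
  have hhd : hd ∈ xs := hperm.subset (by simp [hys])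
  have h1 : m ≤ hd := hmin hd hhd
  have h2 : hd ≤ m := by
    have hmem : m ∈ ys := hperm.mem_iff.mpr hmmem
    rw [hys] at hmem hsort
    rcases List.mem_cons.mp hmem with h | h
    · omega
    · exact le_of_lt ((List.pairwise_cons.mp hsort).1 m h)
  rw [hm, le_antisymm h1 h2]

theorem getMaxOutdegree_main (friends : List (Int × List Int))
    (hpre : Pre_getMaxOutdegree friends) : Spec_getMaxOutdegree friends (getMaxOutdegree friends) := by
  unfold Spec_getMaxOutdegree Pre_getMaxOutdegree at *
  rcases friends with _ | ⟨q, rest⟩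
  · rfl
  set friends := q :: rest with hfr
  set f : Int → Nat := fun s => ((PySem.Dict.mk friends).getD s []).length with hf
  set key : List Int := friends.map Prod.fst with hkey
  set sk : List Int := PySem.List.sorted key (fun x => x) false with hsk
  have hperm : sk.Perm key := PySem.List.sorted_perm ..
  have hlookup : ∀ p ∈ friends, (PySem.Dict.mk friends).getD p.1 [] = p.2 := by
    intro p hp
    exact PySem.Dict.getD_of_mem_items _
      (show (p.1, p.2) ∈ (PySem.Dict.mk friends).items by simpa using hp)
      (by simpa using hpre) []
  have hmapf : key.map f = friends.map (fun p => p.2.length) := by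
    rw [hkey, List.map_map]
    exact List.map_congr_left (fun p hp => by simp [hf, hlookup p hp])
  have hM : sk.foldl (fun a s => max a (f s)) 0
      = (PySem.List.max? (friends.map (fun p => p.2.length)) (fun x => x)).getD 0 := by
    have h1 : sk.foldl (fun a s => max a (f s)) 0 = (sk.map f).foldl max 0 := by
      rw [List.foldl_map]
    have h2 : (sk.map f).foldl max 0 = (key.map f).foldl max 0 := (hperm.map f).foldl_eq 0
    rw [h1, h2, hmapf, hfr, List.map_cons, PySem.List.max?_id_cons]
    simp [List.foldl_cons]
  by_cases hz : ∀ t ∈ sk, f t ≤ 0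
  · have hA : getMaxOutdegree friends = -1 := by
      show (sk.foldl (fun (p : Nat × Int) s => if f s > p.1 then (f s, s) else p) (0, -1)).2 = -1
      rw [pvLoopA_char, if_pos hz]
    have hmax0 : (PySem.List.max? (friends.map (fun p => p.2.length)) (fun x => x)).getD 0 = 0 := by
      rw [← hM]; exact pvFoldlMax_of_all_le f sk 0 hz
    have hB : getMaxOutdegree_alt friends = -1 := by
      show (if friends.isEmpty then -1 else
        if ((PySem.List.max? (friends.map (fun p => p.2.length)) (fun x => x)).getD 0) = 0 then -1 else
          (PySem.List.min? ((friends.map Prod.fst).filter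
            (fun s => ((PySem.Dict.mk friends).getD s []).length ==
              (PySem.List.max? (friends.map (fun p => p.2.length)) (fun x => x)).getD 0))
            (fun x => x)).getD (-1)) = -1
      rw [show friends.isEmpty = false from rfl]
      simp [hmax0]
    rw [hA, hB]
  · have hMpos : 0 < sk.foldl (fun a s => max a (f s)) 0 := by
      push_neg at hz; obtain ⟨u, hu, hlt⟩ := hz
      exact lt_of_lt_of_le hlt (pvFoldlMax_mem_le f sk 0 u hu)
    obtain ⟨u, hu, hue⟩ := pvFoldlMax_attained f sk 0 hz
    have hlt : sk.Pairwise (· < ·) := by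
      have h1 : sk.Pairwise (fun a b => a ≤ b) := PySem.List.sorted_pairwise key (fun x => x)
      have h2 : sk.Pairwise (· ≠ ·) := (hperm.nodup_iff).mpr hpre
      exact (h1.and h2).imp (fun h => lt_of_le_of_ne h.1 h.2)
    have hfperm : (sk.filter (fun s => f s == sk.foldl (fun a s => max a (f s)) 0)).Perm
        (key.filter (fun s => f s == sk.foldl (fun a s => max a (f s)) 0)) :=
      hperm.filter _
    have hfsorted : (sk.filter (fun s => f s == sk.foldl (fun a s => max a (f s)) 0)).Pairwise (· < ·) :=
      List.Pairwise.sublist List.filter_sublist hlt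
    have hune : u ∈ sk.filter (fun s => f s == sk.foldl (fun a s => max a (f s)) 0) :=
      List.mem_filter.mpr ⟨hu, by simp [hue]⟩
    obtain ⟨hd, tl, hfe⟩ : ∃ hd tl, sk.filter (fun s => f s == sk.foldl (fun a s => max a (f s)) 0) = hd :: tl := by
      cases h : sk.filter (fun s => f s == sk.foldl (fun a s => max a (f s)) 0) with
      | nil => rw [h] at hune; cases hune
      | cons hd tl => exact ⟨hd, tl, rfl⟩
    have hmin : PySem.List.min? (key.filter (fun s => f s == sk.foldl (fun a s => max a (f s)) 0)) (fun x => x) = some hd :=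
      pvMin?_eq_head _ _ hfperm hfsorted hd tl hfe
    have hA : getMaxOutdegree friends = hd := by
      show (sk.foldl (fun (p : Nat × Int) s => if f s > p.1 then (f s, s) else p) (0, -1)).2 = hd
      rw [pvLoopA_char, if_neg hz]
      show (sk.find? (fun s => f s == sk.foldl (fun a s => max a (f s)) 0)).getD (-1) = hd
      rw [pvFind?_eq_head?_filter, hfe]
      rfl
    have hB : getMaxOutdegree_alt friends = hd := by
      show (if friends.isEmpty then -1 else
        if ((PySem.List.max? (friends.map (fun p => p.2.length)) (fun x => x)).getD 0) = 0 then -1 else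
          (PySem.List.min? ((friends.map Prod.fst).filter
            (fun s => ((PySem.Dict.mk friends).getD s []).length ==
              (PySem.List.max? (friends.map (fun p => p.2.length)) (fun x => x)).getD 0))
            (fun x => x)).getD (-1)) = hd
      rw [show friends.isEmpty = false from rfl, ← hM]
      rw [if_neg (by simp), if_neg (Nat.pos_iff_ne_zero.mp hMpos)]
      rw [← hkey]
      show (PySem.List.min? (key.filter (fun s => f s == sk.foldl (fun a s => max a (f s)) 0)) (fun x => x)).getD (-1) = hd
      rw [hmin]
      rfl
    rw [hA, hB]

-- ===== VERDICT (by name: the statement is the Claim_ definition above) =====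
theorem getMaxOutdegree_spec : Claim_equal_getMaxOutdegree := by
  intro friends _ hpre
  exact getMaxOutdegree_main friends hpre
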